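-- pv_equiv track=rewrite | github.com/FredrikVillo/Testing | Prosjekt_1/databaseAnalyser.py | chunk_schema_by_table
-- ===== SOURCE A (Python) =====
-- from typing import List, Dict, Any, Optional
--
-- def chunk_schema_by_table(schema_text: str) -> List[str]:
--     table_chunks = []
--     current = []
--     for line in schema_text.splitlines():
--         if line.strip().startswith('Table: '):
--             if current:
--                 table_chunks.append('\n'.join(current))
--                 current = []
--         if line.strip() or current:
--             current.append(line)
--     if current:
--         table_chunks.append('\n'.join(current))
--     return table_chunks
-- ===== SOURCE B (Python) =====
-- def chunk_schema_by_table(schema_text):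
--     lines = schema_text.splitlines()
--     k = 0
--     while k < len(lines) and not lines[k].strip():
--         k += 1
--     lines = lines[k:]
--     chunks = []
--     while lines:
--         body = 1
--         while body < len(lines) and not lines[body].strip().startswith('Table: '):
--             body += 1
--         chunks.append('\n'.join(lines[:body]))
--         lines = lines[body:]
--     return chunks
-- ===== Notes on version B (the rewrite author's own statement) =====
-- stated objective: alternative
-- what changed: Replaces A's single-pass accumulate/flush state machine (table_chunks/current with conditional appends) by a two-phase decomposition: drop the leading blank lines, then repeatedly take the head line plus the following non-'Table: ' lines as one chunk and continue on the remainder.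
import Mathlib
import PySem

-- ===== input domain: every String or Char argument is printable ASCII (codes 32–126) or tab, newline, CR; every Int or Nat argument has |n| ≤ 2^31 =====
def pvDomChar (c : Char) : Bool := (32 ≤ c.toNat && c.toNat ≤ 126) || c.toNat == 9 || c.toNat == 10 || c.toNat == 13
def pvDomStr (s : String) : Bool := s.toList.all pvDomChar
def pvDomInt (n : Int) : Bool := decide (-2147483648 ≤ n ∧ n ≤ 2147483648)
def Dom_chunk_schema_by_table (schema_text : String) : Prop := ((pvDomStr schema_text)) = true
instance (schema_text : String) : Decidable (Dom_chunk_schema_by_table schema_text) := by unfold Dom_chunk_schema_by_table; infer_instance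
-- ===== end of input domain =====

-- B replaces A's accumulate/flush state machine by a dropWhile of leading blank
-- lines followed by repeated take/drop at 'Table: ' boundaries (objective: alternative).

-- shared line predicates: line.strip().startswith('Table: ') and truthiness of line.strip()
def pvIsTable (l : String) : Bool := PySem.Str.startswith (PySem.Str.strip l) "Table: "
def pvBlank (l : String) : Bool := PySem.Str.strip l == ""

-- ===== PORT A =====
-- one loop iteration of A: flush current on a 'Table: ' line, then append the line unless it is a blank line with empty current
def pvStepA (st : List String × List String) (line : String) : List String × List String :=
  let st1 :=
    if pvIsTable line then
      (if st.2 ≠ [] then (st.1 ++ [PySem.Str.join "\n" st.2], ([] : List String)) else st)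
    else st
  if ¬ pvBlank line ∨ st1.2 ≠ [] then (st1.1, st1.2 ++ [line]) else st1

def chunk_schema_by_table (schema_text : String) : List String :=
  let st := (PySem.Str.splitlines schema_text).foldl pvStepA ([], [])
  if st.2 ≠ [] then st.1 ++ [PySem.Str.join "\n" st.2] else st.1

-- ===== PORT B =====
-- B's outer while loop: each chunk is the head line plus the following non-'Table: ' lines
def pvChunksB : List String → List String
  | [] => []
  | l :: rest =>
      PySem.Str.join "\n" (l :: rest.takeWhile (fun x => !pvIsTable x)) ::
      pvChunksB (rest.dropWhile (fun x => !pvIsTable x))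
termination_by ls => ls.length
decreasing_by
  simp only [List.length_cons]
  exact Nat.lt_succ_of_le (List.length_dropWhile_le _ _)

def chunk_schema_by_table_alt (schema_text : String) : List String :=
  pvChunksB ((PySem.Str.splitlines schema_text).dropWhile pvBlank)

-- ===== PRECONDITION & SPEC =====
def Spec_chunk_schema_by_table (schema_text : String) (out : List String) : Prop := out = chunk_schema_by_table_alt schema_text
instance (schema_text : String) (out : List String) : Decidable (Spec_chunk_schema_by_table schema_text out) := by unfold Spec_chunk_schema_by_table; infer_instance

-- ===== CLAIM (what is proved, stated in full; the proofs are below) =====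
def Claim_equal_chunk_schema_by_table : Prop := ∀ (schema_text : String), Dom_chunk_schema_by_table schema_text → Spec_chunk_schema_by_table schema_text (chunk_schema_by_table schema_text)

-- ===== LEMMAS AND PROOFS =====

-- finalization of A's state (the trailing 'if current:' flush)
def pvFin (st : List String × List String) : List String :=
  if st.2 ≠ [] then st.1 ++ [PySem.Str.join "\n" st.2] else st.1

-- A's result after a flush, as a structural recursion on the remaining lines
def pvChunksC (cur : List String) : List String → List String
  | [] => [PySem.Str.join "\n" cur]
  | l :: ls => if pvIsTable l then PySem.Str.join "\n" cur :: pvChunksC [l] ls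
               else pvChunksC (cur ++ [l]) ls

lemma table_not_blank {l : String} (h : pvIsTable l = true) : pvBlank l = false := by
  unfold pvIsTable at h
  unfold pvBlank
  by_contra hb
  simp only [Bool.not_eq_false, beq_iff_eq] at hb
  rw [hb] at h
  exact absurd h (by decide)


lemma stepA_blank {tc : List String} {l : String} (h : pvBlank l = true) :
    pvStepA (tc, []) l = (tc, []) := by
  have ht : pvIsTable l = false := by
    unfold pvBlank at h
    simp only [beq_iff_eq] at h
    unfold pvIsTable
    rw [h]; decide
  unfold pvStepA
  simp [h, ht]

lemma foldl_dropWhile_blank (ls : List String) (tc : List String) :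
    ls.foldl pvStepA (tc, []) = (ls.dropWhile pvBlank).foldl pvStepA (tc, []) := by
  induction ls with
  | nil => rfl
  | cons l ls ih =>
    by_cases h : pvBlank l = true
    · rw [List.foldl_cons, stepA_blank h, List.dropWhile_cons_of_pos h, ih]
    · rw [List.dropWhile_cons_of_neg h]

lemma stepA_cur_ne (tc cur : List String) (l : String) (hcur : cur ≠ []) :
    pvStepA (tc, cur) l =
      if pvIsTable l then (tc ++ [PySem.Str.join "\n" cur], [l]) else (tc, cur ++ [l]) := by
  unfold pvStepA
  by_cases ht : pvIsTable l = true
  · have hb := table_not_blank ht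
    simp [ht, hcur, hb]
  · simp [ht, hcur]

lemma fin_foldl (ls : List String) (tc cur : List String) (hcur : cur ≠ []) :
    pvFin (ls.foldl pvStepA (tc, cur)) = tc ++ pvChunksC cur ls := by
  induction ls generalizing tc cur with
  | nil => simp [pvFin, pvChunksC, hcur]
  | cons l ls ih =>
    rw [List.foldl_cons, stepA_cur_ne tc cur l hcur]
    by_cases ht : pvIsTable l = true
    · simp only [ht, if_pos]
      rw [ih _ [l] (by simp), pvChunksC]
      simp [ht]
    · simp only [ht, if_neg, Bool.false_eq_true, not_false_iff]
      rw [ih _ (cur ++ [l]) (by simp), pvChunksC]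
      simp [ht]

lemma chunksC_eq_chunksB (ls : List String) (cur : List String) :
    pvChunksC cur ls =
      PySem.Str.join "\n" (cur ++ ls.takeWhile (fun x => !pvIsTable x)) ::
      pvChunksB (ls.dropWhile (fun x => !pvIsTable x)) := by
  induction ls generalizing cur with
  | nil => simp [pvChunksC, pvChunksB]
  | cons l ls ih =>
    by_cases ht : pvIsTable l = true
    · rw [pvChunksC]
      simp only [ht, if_pos]
      rw [ih [l]]
      rw [List.takeWhile_cons_of_neg (by simp [ht]), List.dropWhile_cons_of_neg (by simp [ht])]
      simp [pvChunksB]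
    · rw [pvChunksC]
      simp only [ht, Bool.false_eq_true, if_neg, not_false_iff]
      rw [ih (cur ++ [l])]
      rw [List.takeWhile_cons_of_pos (by simp [ht]), List.dropWhile_cons_of_pos (by simp [ht])]
      simp

lemma stepA_first (l : String) (h : pvBlank l = false) :
    pvStepA ([], []) l = ([], [l]) := by
  unfold pvStepA
  by_cases ht : pvIsTable l = true <;> simp [ht, h]

-- ===== VERDICT (by name: the statement is the Claim_ definition above) =====
theorem chunk_schema_by_table_spec : Claim_equal_chunk_schema_by_table := by
  intro s _
  unfold Spec_chunk_schema_by_table chunk_schema_by_table chunk_schema_by_table_alt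
  show pvFin ((PySem.Str.splitlines s).foldl pvStepA ([], [])) = _
  rw [foldl_dropWhile_blank]
  cases hd : (PySem.Str.splitlines s).dropWhile pvBlank with
  | nil => simp [pvFin, pvChunksB]
  | cons h t =>
    have hb : pvBlank h = false := by
      have := List.head?_dropWhile_not pvBlank (PySem.Str.splitlines s)
      rw [hd] at this
      simpa using this
    rw [List.foldl_cons, stepA_first h hb, fin_foldl t [] [h] (by simp)]
    rw [chunksC_eq_chunksB]
    simp [pvChunksB]
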